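-- pv_equiv track=rewrite | github.com/Dsadd4/NLSExplorer_1.0 | Recommendation_system/BAU_statistic.py | process_target
-- ===== SOURCE A (Python) =====
-- def process_target(T_TARGET):
--     processed_target = []
--     for layer_index in range(len(T_TARGET[0])):
--         layer_target = []
--         for head_index in range(len(T_TARGET[0][layer_index])):
--             sum_target = sum(T_TARGET[iter_idx][layer_index][head_index] for iter_idx in range(len(T_TARGET)))
--             layer_target.append(sum_target)
--         processed_target.append(layer_target)
--     return processed_target
-- ===== SOURCE B (Python) =====
-- def process_target(T_TARGET):
--     result = [[0] * len(layer) for layer in T_TARGET[0]]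
--     for mat in T_TARGET:
--         for layer_index, row in enumerate(result):
--             for head_index in range(len(row)):
--                 row[head_index] += mat[layer_index][head_index]
--     return result
-- ===== Notes on version B (the rewrite author's own statement) =====
-- stated objective: alternative
-- what changed: Replaces A's cell-major nested loops (one independent sum over all iterations per output cell) with an iteration-major single sweep that accumulates each iteration's matrix into a zero-initialised result matrix.
import Mathlib
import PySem

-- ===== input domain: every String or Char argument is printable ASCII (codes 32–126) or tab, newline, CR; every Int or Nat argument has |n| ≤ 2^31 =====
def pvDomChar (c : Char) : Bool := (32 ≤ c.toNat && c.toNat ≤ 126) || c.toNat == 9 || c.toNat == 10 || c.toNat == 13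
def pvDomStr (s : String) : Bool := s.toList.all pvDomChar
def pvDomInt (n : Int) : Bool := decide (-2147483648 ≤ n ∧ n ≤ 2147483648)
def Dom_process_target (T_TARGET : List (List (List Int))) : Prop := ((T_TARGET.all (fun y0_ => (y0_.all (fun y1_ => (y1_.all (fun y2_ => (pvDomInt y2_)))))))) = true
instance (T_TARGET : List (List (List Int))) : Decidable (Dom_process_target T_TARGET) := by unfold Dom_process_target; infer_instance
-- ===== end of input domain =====

-- B replaces A's cell-major independent sums by an iteration-major accumulating sweep (alternative decomposition, same cost).

-- ===== PORT A =====
-- cell-major: for each layer, for each head, sum over all iterations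
def process_target (T_TARGET : List (List (List Int))) : List (List Int) :=
  (List.range T_TARGET.headI.length).map (fun layer_index =>
    (List.range (T_TARGET.headI.getD layer_index []).length).map (fun head_index =>
      T_TARGET.foldl (fun s mat => s + ((mat.getD layer_index []).getD head_index 0)) 0))

-- ===== PORT B =====
-- add one iteration's matrix into the accumulator (row[head] += mat[layer][head])
def ptStep (res : List (List Int)) (mat : List (List Int)) : List (List Int) :=
  res.mapIdx (fun layer_index row =>
    row.mapIdx (fun head_index v => v + ((mat.getD layer_index []).getD head_index 0)))

-- iteration-major: zero matrix shaped from T_TARGET[0], then accumulate each iteration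
def process_target_alt (T_TARGET : List (List (List Int))) : List (List Int) :=
  T_TARGET.foldl ptStep (T_TARGET.headI.map (fun layer => layer.map (fun _ => (0 : Int))))

-- ===== PRECONDITION & SPEC =====
-- Pre_: exactly the inputs where Python A returns (no IndexError): T_TARGET nonempty and, for every
-- layer of T_TARGET[0] with at least one head, every iteration's matrix has that layer and at least as many heads there.
def Pre_process_target (T_TARGET : List (List (List Int))) : Prop :=
  T_TARGET ≠ [] ∧ ∀ mat ∈ T_TARGET, ∀ i ∈ List.range T_TARGET.headI.length,
    (T_TARGET.headI.getD i []).length = 0 ∨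
      (i < mat.length ∧ (T_TARGET.headI.getD i []).length ≤ (mat.getD i []).length)
instance (T_TARGET : List (List (List Int))) : Decidable (Pre_process_target T_TARGET) := by
  unfold Pre_process_target; infer_instance

def pvWitness_process_target : List (List (List Int)) := [[[1, 2], [3]], [[4, 5], [6]]]

def Spec_process_target (T_TARGET : List (List (List Int))) (out : List (List Int)) : Prop := out = process_target_alt T_TARGET
instance (T_TARGET : List (List (List Int))) (out : List (List Int)) : Decidable (Spec_process_target T_TARGET out) := by unfold Spec_process_target; infer_instance

-- ===== CLAIM (what is proved, stated in full; the proofs are below) =====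
def Claim_equal_process_target : Prop := ∀ (T_TARGET : List (List (List Int))), Dom_process_target T_TARGET → Pre_process_target T_TARGET → Spec_process_target T_TARGET (process_target T_TARGET)

-- ===== LEMMAS AND PROOFS =====

theorem foldl_add_shift (g : List (List Int) → Int) (L : List (List (List Int))) (a : Int) :
    L.foldl (fun s x => s + g x) a = a + L.foldl (fun s x => s + g x) 0 := by
  induction L generalizing a with
  | nil => simp
  | cons m L ih => simp only [List.foldl_cons]; rw [ih, ih (0 + g m)]; ring

theorem foldl_step_length (L : List (List (List Int))) (M : List (List Int)) :
    (L.foldl ptStep M).length = M.length := by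
  induction L generalizing M with
  | nil => rfl
  | cons m L ih => simp [List.foldl_cons, ih, ptStep]

theorem foldl_step_row (L : List (List (List Int))) (M : List (List Int)) (i : ℕ)
    (h : i < M.length) :
    (L.foldl ptStep M)[i]'(by rw [foldl_step_length]; exact h) =
      (M[i]'h).mapIdx (fun j v =>
        v + L.foldl (fun s mat => s + ((mat.getD i []).getD j 0)) 0) := by
  induction L generalizing M with
  | nil =>
    simp only [List.foldl_nil]
    apply List.ext_getElem <;> simp
  | cons m L ih =>
    simp only [List.foldl_cons]
    rw [ih (ptStep M m) (by simp [ptStep, h])]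
    apply List.ext_getElem
    · simp [ptStep]
    · intro j hj hj'
      simp only [List.getElem_mapIdx, ptStep]
      rw [foldl_add_shift (fun mat => (mat.getD i []).getD j 0) L,
        foldl_add_shift (fun mat => (mat.getD i []).getD j 0) L (0 + (m.getD i []).getD j 0)]
      ring

theorem ports_agree (T : List (List (List Int))) :
    process_target T = process_target_alt T := by
  unfold process_target process_target_alt
  apply List.ext_getElem
  · simp [foldl_step_length]
  · intro i hi hi'
    have hiM : i < (T.headI.map (fun layer => layer.map (fun _ => (0 : Int)))).length := by
      simpa using (by simpa using hi : i < T.headI.length)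
    rw [foldl_step_row T _ i hiM]
    apply List.ext_getElem
    · simp [List.getD_eq_getElem?_getD, List.getElem?_eq_getElem (by simpa using hi)]
    · intro j hj hj'
      simp only [List.getElem_map, List.getElem_range, List.getElem_mapIdx]
      ring

-- ===== VERDICT (by name: the statement is the Claim_ definition above) =====
theorem process_target_spec : Claim_equal_process_target := by
  intro T _ _
  unfold Spec_process_target
  exact ports_agree T
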